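-- pv_equiv track=rewrite | github.com/sumichip0311/python_study | 가위바위보 다수결 찾기.py | rock_scissors_paper
-- ===== SOURCE A (Python) =====
-- def rock_scissors_paper(total_num):
--     count = 0
--     for rock in range(0, total_num + 1):    #바위
--         r_num = total_num - rock
--         for scissors in range(0, r_num + 1):    #가위
--             paper = r_num - scissors    #보
--             rsp_list = [rock, scissors, paper]
--             if rsp_list.count(max(rsp_list)) == 1: #리스트로 만들어 최대값이 1나인수를 찾는다
--                 count += 1
--     return count
-- ===== SOURCE B (Python) =====
-- def rock_scissors_paper(total_num):
--     # closed form: all compositions of total_num into 3 nonneg parts,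
--     # minus those whose maximum is tied
--     if total_num < 0:
--         return 0
--     n = total_num
--     return (n + 1) * (n + 2) // 2 - 3 * (n // 2 - n // 3) - (1 if n % 3 == 0 else 0)
-- ===== Notes on version B (the rewrite author's own statement) =====
-- stated objective: faster
-- what changed: Replaced A's O(n^2) double loop over all (rock, scissors) splits by an O(1) closed-form combinatorial count: (n+1)(n+2)/2 compositions of n into 3 nonnegative parts, minus 3*(n//2 - n//3) + [3|n] tied-maximum cases.
import Mathlib
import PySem

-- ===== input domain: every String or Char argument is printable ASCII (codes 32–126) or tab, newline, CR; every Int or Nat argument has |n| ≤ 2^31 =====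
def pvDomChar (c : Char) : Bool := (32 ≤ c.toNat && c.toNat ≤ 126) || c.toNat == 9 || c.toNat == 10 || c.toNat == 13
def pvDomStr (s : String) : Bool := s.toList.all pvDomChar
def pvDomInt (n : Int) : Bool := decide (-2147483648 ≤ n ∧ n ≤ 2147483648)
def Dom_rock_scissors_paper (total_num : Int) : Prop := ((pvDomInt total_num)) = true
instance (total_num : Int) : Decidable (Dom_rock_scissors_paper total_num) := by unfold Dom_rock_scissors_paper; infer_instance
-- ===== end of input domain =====

-- B replaces A's quadratic double loop by a closed-form combinatorial count
-- (all compositions of n into 3 nonnegative parts minus those with a tied maximum).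

-- ===== PORT A =====
def rock_scissors_paper (total_num : Int) : Int :=
  (PySem.List.pyRange 0 (total_num + 1)).foldl (fun count rock =>
    let r_num := total_num - rock
    (PySem.List.pyRange 0 (r_num + 1)).foldl (fun count scissors =>
      let paper := r_num - scissors
      let rsp_list : List Int := [rock, scissors, paper]
      if rsp_list.count ((PySem.List.max? rsp_list (fun x => x)).getD 0) == 1 then count + 1
      else count) count) 0

-- ===== PORT B =====
def rock_scissors_paper_alt (total_num : Int) : Int :=
  if total_num < 0 then 0
  else
    PySem.Int.floordiv ((total_num + 1) * (total_num + 2)) 2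
      - 3 * (PySem.Int.floordiv total_num 2 - PySem.Int.floordiv total_num 3)
      - (if PySem.Int.mod total_num 3 == 0 then 1 else 0)

-- ===== PRECONDITION & SPEC =====
def Spec_rock_scissors_paper (total_num : Int) (out : Int) : Prop := out = rock_scissors_paper_alt total_num
instance (total_num : Int) (out : Int) : Decidable (Spec_rock_scissors_paper total_num out) := by unfold Spec_rock_scissors_paper; infer_instance

-- ===== CLAIM (what is proved, stated in full; the proofs are below) =====
def Claim_equal_rock_scissors_paper : Prop := ∀ (total_num : Int), Dom_rock_scissors_paper total_num → Spec_rock_scissors_paper total_num (rock_scissors_paper total_num)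

-- ===== LEMMAS AND PROOFS =====

def pvCond (a s p : Int) : Bool :=
  [a, s, p].count ((PySem.List.max? [a, s, p] (fun x => x)).getD 0) == 1

theorem pvCond_iff (a s p : Int) :
    pvCond a s p = true ↔
      (¬(a = s ∧ p ≤ a) ∧ ¬(a = p ∧ s ≤ a) ∧ ¬(s = p ∧ a ≤ s)) := by
  unfold pvCond
  rw [PySem.List.max?_id_cons]
  simp [List.foldl, List.count_cons, Int.max_def]
  split_ifs <;> simp <;> omega

theorem pvPointwise (N a s : ℕ) (ha : a ≤ N) (hs : s ≤ N - a) :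
    (if pvCond ↑a ↑s (↑N - ↑a - ↑s) then (1:ℤ) else 0)
      = 1 + 2 * (if (s = a ∧ 3 * a = N) then (1:ℤ) else 0)
        - (if (s = a ∧ N - a - s ≤ a) then (1:ℤ) else 0)
        - (if (N - a - s = a ∧ s ≤ a) then (1:ℤ) else 0)
        - (if (N - a - s = s ∧ a ≤ s) then (1:ℤ) else 0) := by
  have hcast : (↑N - ↑a - ↑s : ℤ) = ↑(N - a - s) := by omega
  rw [hcast]
  by_cases hc : pvCond ↑a ↑s ↑(N - a - s) = true
  · rw [if_pos hc]
    have h := (pvCond_iff ↑a ↑s ↑(N - a - s)).mp hc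
    push_cast at h
    split_ifs <;> omega
  · rw [if_neg hc]
    have h : ¬(¬((a:ℤ) = s ∧ (↑(N-a-s):ℤ) ≤ a) ∧ ¬((a:ℤ) = ↑(N-a-s) ∧ (s:ℤ) ≤ a) ∧ ¬((s:ℤ) = ↑(N-a-s) ∧ (a:ℤ) ≤ s)) := fun hh => hc ((pvCond_iff _ _ _).mpr hh)
    push_cast at h
    split_ifs <;> omega

theorem pvSumMapRange (K : ℕ) (f : ℕ → ℤ) :
    ((List.range K).map f).sum = ∑ i ∈ Finset.range K, f i := by
  induction K with
  | zero => simp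
  | succ k ih => simp [List.range_succ, Finset.sum_range_succ, ih]

theorem pvCountPRange (K : ℕ) (q : ℕ → Bool) :
    ((List.range K).countP q : ℤ) = ∑ i ∈ Finset.range K, (if q i then (1:ℤ) else 0) := by
  induction K with
  | zero => simp
  | succ k ih =>
    rw [List.range_succ, List.countP_append, Finset.sum_range_succ, ← ih]
    by_cases h : q k = true <;> simp [h]

theorem pvSumIteEqAnd (K a : ℕ) (Q : Prop) [Decidable Q] :
    ∑ s ∈ Finset.range K, (if (s = a ∧ Q) then (1:ℤ) else 0)
      = if (a < K ∧ Q) then 1 else 0 := by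
  by_cases hQ : Q
  · simp [hQ, Finset.sum_ite_eq', Finset.mem_range]
  · simp [hQ]

theorem pvC1 (N : ℕ) :
    ∑ a ∈ Finset.range (N+1), (if (N ≤ 3*a ∧ 2*a ≤ N) then (1:ℤ) else 0)
      = ↑(N/2 + 1 - (N+2)/3) := by
  rw [Finset.sum_boole]
  congr 1
  have : Finset.filter (fun a => N ≤ 3*a ∧ 2*a ≤ N) (Finset.range (N+1))
      = Finset.Ico ((N+2)/3) (N/2+1) := by
    ext a
    simp only [Finset.mem_filter, Finset.mem_range, Finset.mem_Ico]
    omega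
  rw [this, Nat.card_Ico]

theorem pvC2 (N : ℕ) :
    ∑ a ∈ Finset.range (N+1), (if ((N - a) % 2 = 0 ∧ 3*a ≤ N) then (1:ℤ) else 0)
      = ↑(N/2 + 1 - (N+2)/3) := by
  rw [Finset.sum_boole]
  congr 1
  have himg : Finset.filter (fun a => (N - a) % 2 = 0 ∧ 3*a ≤ N) (Finset.range (N+1))
      = Finset.image (fun j => N % 2 + 2*j) (Finset.range (N/2 + 1 - (N+2)/3)) := by
    ext a
    simp only [Finset.mem_filter, Finset.mem_range, Finset.mem_image]
    constructor
    · rintro ⟨h1, h2, h3⟩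
      exact ⟨(a - N % 2)/2, by omega, by omega⟩
    · rintro ⟨j, hj, rfl⟩
      omega
  rw [himg, Finset.card_image_of_injective _ (fun x y h => by omega), Finset.card_range]

theorem pvGauss (N : ℕ) :
    ∑ a ∈ Finset.range (N+1), ((N + 1 - a : ℕ) : ℤ) = ↑((N+1)*(N+2)/2) := by
  have hrefl : ∑ a ∈ Finset.range (N+1), (N+1-a) = ∑ a ∈ Finset.range (N+1), (a+1) := by
    rw [← Finset.sum_range_reflect]
    refine Finset.sum_congr rfl (fun i hi => ?_)
    rw [Finset.mem_range] at hi
    omega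
  have h0 : ∑ i ∈ Finset.range (N+2), i = ∑ i ∈ Finset.range (N+1), (i+1) := by
    rw [Finset.sum_range_succ']
    simp
  have h2 := Finset.sum_range_id_mul_two (N+2)
  have key : (∑ a ∈ Finset.range (N+1), (N+1-a)) * 2 = (N+1)*(N+2) := by
    rw [hrefl, ← h0, h2, Nat.mul_comm]
    norm_num
  have h : (∑ a ∈ Finset.range (N+1), (N+1-a)) = (N+1)*(N+2)/2 := by
    generalize hM : (N+1)*(N+2) = M at key ⊢
    omega
  rw [← Nat.cast_sum, h]

theorem pvInner (N a : ℕ) (P : ℕ → Prop) [DecidablePred P] (b : ℕ) (Q : Prop) [Decidable Q]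
    (hiff : ∀ s, s < N+1-a → (P s ↔ (s = b ∧ Q))) (hb : Q → b < N+1-a) :
    ∑ s ∈ Finset.range (N+1-a), (if P s then (1:ℤ) else 0) = if Q then 1 else 0 := by
  have h : ∑ s ∈ Finset.range (N+1-a), (if P s then (1:ℤ) else 0)
      = ∑ s ∈ Finset.range (N+1-a), (if (s = b ∧ Q) then (1:ℤ) else 0) :=
    Finset.sum_congr rfl (fun s hs => by
      rw [Finset.mem_range] at hs
      have hi := hiff s hs
      by_cases hP : P s
      · rw [if_pos hP, if_pos (hi.mp hP)]
      · rw [if_neg hP, if_neg (fun hq => hP (hi.mpr hq))])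
  rw [h, pvSumIteEqAnd]
  by_cases hQ : Q
  · simp [hQ, hb hQ]
  · simp [hQ]

theorem pvMain (N : ℕ) :
    ∑ a ∈ Finset.range (N+1), ∑ s ∈ Finset.range (N+1-a),
        (if pvCond ↑a ↑s (↑N - ↑a - ↑s) then (1:ℤ) else 0)
      = ↑((N+1)*(N+2)/2) - 3*((↑(N/2):ℤ) - ↑(N/3)) - (if N % 3 = 0 then (1:ℤ) else 0) := by
  have hsplit : ∑ a ∈ Finset.range (N+1), ∑ s ∈ Finset.range (N+1-a),
        (if pvCond ↑a ↑s (↑N - ↑a - ↑s) then (1:ℤ) else 0)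
      = (∑ a ∈ Finset.range (N+1), ∑ s ∈ Finset.range (N+1-a), (1:ℤ))
        + 2 * (∑ a ∈ Finset.range (N+1), ∑ s ∈ Finset.range (N+1-a), (if (s = a ∧ 3*a = N) then (1:ℤ) else 0))
        - (∑ a ∈ Finset.range (N+1), ∑ s ∈ Finset.range (N+1-a), (if (s = a ∧ N - a - s ≤ a) then (1:ℤ) else 0))
        - (∑ a ∈ Finset.range (N+1), ∑ s ∈ Finset.range (N+1-a), (if (N - a - s = a ∧ s ≤ a) then (1:ℤ) else 0))
        - (∑ a ∈ Finset.range (N+1), ∑ s ∈ Finset.range (N+1-a), (if (N - a - s = s ∧ a ≤ s) then (1:ℤ) else 0)) := by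
    have hpt : ∑ a ∈ Finset.range (N+1), ∑ s ∈ Finset.range (N+1-a),
          (if pvCond ↑a ↑s (↑N - ↑a - ↑s) then (1:ℤ) else 0)
        = ∑ a ∈ Finset.range (N+1), ∑ s ∈ Finset.range (N+1-a),
            (1 + 2 * (if (s = a ∧ 3*a = N) then (1:ℤ) else 0)
              - (if (s = a ∧ N - a - s ≤ a) then (1:ℤ) else 0)
              - (if (N - a - s = a ∧ s ≤ a) then (1:ℤ) else 0)
              - (if (N - a - s = s ∧ a ≤ s) then (1:ℤ) else 0)) :=
      Finset.sum_congr rfl (fun a ha => Finset.sum_congr rfl (fun s hs => by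
        rw [Finset.mem_range] at ha hs
        exact pvPointwise N a s (by omega) (by omega)))
    rw [hpt]
    simp only [Finset.sum_sub_distrib, Finset.sum_add_distrib, ← Finset.mul_sum]
  have hT0 : (∑ a ∈ Finset.range (N+1), ∑ s ∈ Finset.range (N+1-a), (1:ℤ)) = ↑((N+1)*(N+2)/2) := by
    simp only [Finset.sum_const, Finset.card_range, nsmul_eq_mul, mul_one]
    exact pvGauss N
  have hSEq : (∑ a ∈ Finset.range (N+1), ∑ s ∈ Finset.range (N+1-a), (if (s = a ∧ 3*a = N) then (1:ℤ) else 0))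
      = (if N % 3 = 0 then (1:ℤ) else 0) := by
    have h1 : (∑ a ∈ Finset.range (N+1), ∑ s ∈ Finset.range (N+1-a), (if (s = a ∧ 3*a = N) then (1:ℤ) else 0))
        = ∑ a ∈ Finset.range (N+1), (if (a = N/3 ∧ N % 3 = 0) then (1:ℤ) else 0) :=
      Finset.sum_congr rfl (fun a ha => by
        rw [pvInner N a (fun s => (s = a ∧ 3*a = N)) a (3*a = N) (fun s hs => Iff.rfl) (fun hQ => by omega)]
        by_cases h3 : 3*a = N
        · rw [if_pos h3, if_pos (by omega)]
        · rw [if_neg h3, if_neg (by omega)])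
    rw [h1, pvSumIteEqAnd]
    by_cases h3 : N % 3 = 0
    · rw [if_pos ⟨by omega, h3⟩, if_pos h3]
    · rw [if_neg (by omega), if_neg h3]
  have hS1 : (∑ a ∈ Finset.range (N+1), ∑ s ∈ Finset.range (N+1-a), (if (s = a ∧ N - a - s ≤ a) then (1:ℤ) else 0))
      = ↑(N/2 + 1 - (N+2)/3) := by
    have h1 : (∑ a ∈ Finset.range (N+1), ∑ s ∈ Finset.range (N+1-a), (if (s = a ∧ N - a - s ≤ a) then (1:ℤ) else 0))
        = ∑ a ∈ Finset.range (N+1), (if (N ≤ 3*a ∧ 2*a ≤ N) then (1:ℤ) else 0) :=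
      Finset.sum_congr rfl (fun a ha =>
        pvInner N a (fun s => (s = a ∧ N - a - s ≤ a)) a (N ≤ 3*a ∧ 2*a ≤ N)
          (fun s hs => by omega) (fun hQ => by omega))
    rw [h1]
    exact pvC1 N
  have hS2 : (∑ a ∈ Finset.range (N+1), ∑ s ∈ Finset.range (N+1-a), (if (N - a - s = a ∧ s ≤ a) then (1:ℤ) else 0))
      = ↑(N/2 + 1 - (N+2)/3) := by
    have h1 : (∑ a ∈ Finset.range (N+1), ∑ s ∈ Finset.range (N+1-a), (if (N - a - s = a ∧ s ≤ a) then (1:ℤ) else 0))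
        = ∑ a ∈ Finset.range (N+1), (if (N ≤ 3*a ∧ 2*a ≤ N) then (1:ℤ) else 0) :=
      Finset.sum_congr rfl (fun a ha =>
        pvInner N a (fun s => (N - a - s = a ∧ s ≤ a)) (N - 2*a) (N ≤ 3*a ∧ 2*a ≤ N)
          (fun s hs => by omega) (fun hQ => by omega))
    rw [h1]
    exact pvC1 N
  have hS3 : (∑ a ∈ Finset.range (N+1), ∑ s ∈ Finset.range (N+1-a), (if (N - a - s = s ∧ a ≤ s) then (1:ℤ) else 0))
      = ↑(N/2 + 1 - (N+2)/3) := by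
    have h1 : (∑ a ∈ Finset.range (N+1), ∑ s ∈ Finset.range (N+1-a), (if (N - a - s = s ∧ a ≤ s) then (1:ℤ) else 0))
        = ∑ a ∈ Finset.range (N+1), (if ((N - a) % 2 = 0 ∧ 3*a ≤ N) then (1:ℤ) else 0) :=
      Finset.sum_congr rfl (fun a ha =>
        pvInner N a (fun s => (N - a - s = s ∧ a ≤ s)) ((N - a)/2) ((N - a) % 2 = 0 ∧ 3*a ≤ N)
          (fun s hs => by omega) (fun hQ => by rw [Finset.mem_range] at ha; omega))
    rw [h1]
    exact pvC2 N
  rw [hsplit, hT0, hSEq, hS1, hS2, hS3]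
  generalize (N+1)*(N+2)/2 = T
  by_cases h3 : N % 3 = 0 <;> simp [h3] <;> omega

theorem pvA_eq (N : ℕ) :
    rock_scissors_paper ↑N
      = ∑ a ∈ Finset.range (N+1), ∑ s ∈ Finset.range (N+1-a),
          (if pvCond ↑a ↑s (↑N - ↑a - ↑s) then (1:ℤ) else 0) := by
  unfold rock_scissors_paper
  refine ((PySem.List.foldl_congr_mem _ _ _ _ (fun acc x hx =>
    PySem.List.foldl_if_add_one
      (fun scissors => [x, scissors, (N:ℤ) - x - scissors].count
        ((PySem.List.max? [x, scissors, (N:ℤ) - x - scissors] (fun y => y)).getD 0) == 1)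
      (PySem.List.pyRange 0 ((N:ℤ) - x + 1)) acc)).trans ?_)
  rw [PySem.List.foldl_add, zero_add, PySem.List.pyRange_one, List.map_map]
  rw [show ((N:ℤ) + 1 - 0).toNat = N + 1 from by omega]
  rw [pvSumMapRange]
  refine Finset.sum_congr rfl (fun k hk => ?_)
  rw [Finset.mem_range] at hk
  simp only [Function.comp, zero_add]
  rw [show ((N:ℤ) - ↑k + 1) = ↑(N + 1 - k) from by omega]
  rw [PySem.List.pyRange_one]
  rw [show ((↑(N + 1 - k) : ℤ) - 0).toNat = N + 1 - k from by omega]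
  rw [List.countP_map, pvCountPRange]
  refine Finset.sum_congr rfl (fun s hs => ?_)
  simp only [Function.comp, zero_add, pvCond]
  rfl

theorem pvB_eq (N : ℕ) :
    rock_scissors_paper_alt ↑N
      = ↑((N+1)*(N+2)/2) - 3*((↑(N/2):ℤ) - ↑(N/3)) - (if N % 3 = 0 then (1:ℤ) else 0) := by
  unfold rock_scissors_paper_alt
  rw [if_neg (by omega : ¬((N:ℤ) < 0))]
  rw [PySem.Int.floordiv_eq_ediv_of_pos (by norm_num), PySem.Int.floordiv_eq_ediv_of_pos (by norm_num),
    PySem.Int.floordiv_eq_ediv_of_pos (by norm_num), PySem.Int.mod_eq_emod_of_pos (by norm_num)]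
  rw [show ((N:ℤ)+1)*((N:ℤ)+2) = ↑((N+1)*(N+2)) from by push_cast; ring]
  rw [show ((N:ℤ) % 3) = ↑(N % 3) from by omega]
  generalize (N+1)*(N+2) = M
  by_cases h : N % 3 = 0 <;> simp [h] <;> omega

-- ===== VERDICT (by name: the statement is the Claim_ definition above) =====
theorem rock_scissors_paper_spec : Claim_equal_rock_scissors_paper := by
  intro n _
  unfold Spec_rock_scissors_paper
  by_cases hn : n < 0
  · unfold rock_scissors_paper rock_scissors_paper_alt
    rw [PySem.List.pyRange_one_eq_nil (by omega), if_pos hn]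
    rfl
  · obtain ⟨N, rfl⟩ : ∃ N : ℕ, n = ↑N := ⟨n.toNat, (Int.toNat_of_nonneg (by omega)).symm⟩
    rw [pvA_eq, pvMain, pvB_eq]
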